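-- pv_equiv track=rewrite | github.com/kpizzy812/syntra-trade-consultant | src/services/candlestick_patterns.py | _classify_pattern_signal
-- ===== SOURCE A (Python) =====
-- from typing import Optional, List, Dict, Any
--
-- def _classify_pattern_signal(patterns: List[str]) -> str:
--     """
--     Classify overall pattern signal as bullish, bearish, or neutral
--     """
--     bullish_patterns = [
--         "hammer",
--         "inverted_hammer",
--         "engulfing_bullish",
--         "morning_star",
--         "three_white_soldiers",
--     ]
--     bearish_patterns = [
--         "shooting_star",
--         "engulfing_bearish",
--         "evening_star",
--         "three_black_crows",
--     ]
--
--     bullish_count = sum(1 for p in patterns if p in bullish_patterns)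
--     bearish_count = sum(1 for p in patterns if p in bearish_patterns)
--
--     if bullish_count > bearish_count:
--         return "bullish"
--     elif bearish_count > bullish_count:
--         return "bearish"
--     else:
--         return "neutral"
-- ===== SOURCE B (Python) =====
-- from typing import List
--
-- _WEIGHTS = {
--     "hammer": 1,
--     "inverted_hammer": 1,
--     "engulfing_bullish": 1,
--     "morning_star": 1,
--     "three_white_soldiers": 1,
--     "shooting_star": -1,
--     "engulfing_bearish": -1,
--     "evening_star": -1,
--     "three_black_crows": -1,
-- }
--
-- def _classify_pattern_signal(patterns: List[str]) -> str:
--     score = sum(_WEIGHTS.get(p, 0) for p in patterns)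
--     if score > 0:
--         return "bullish"
--     if score < 0:
--         return "bearish"
--     return "neutral"
-- ===== Notes on version B (the rewrite author's own statement) =====
-- stated objective: simpler
-- what changed: A's two filtered counting passes over list-membership tests are replaced by one signed-weight table (pattern -> +1/-1) summed in a single map-and-sum pass; the sign of the total decides the label.
import Mathlib
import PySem

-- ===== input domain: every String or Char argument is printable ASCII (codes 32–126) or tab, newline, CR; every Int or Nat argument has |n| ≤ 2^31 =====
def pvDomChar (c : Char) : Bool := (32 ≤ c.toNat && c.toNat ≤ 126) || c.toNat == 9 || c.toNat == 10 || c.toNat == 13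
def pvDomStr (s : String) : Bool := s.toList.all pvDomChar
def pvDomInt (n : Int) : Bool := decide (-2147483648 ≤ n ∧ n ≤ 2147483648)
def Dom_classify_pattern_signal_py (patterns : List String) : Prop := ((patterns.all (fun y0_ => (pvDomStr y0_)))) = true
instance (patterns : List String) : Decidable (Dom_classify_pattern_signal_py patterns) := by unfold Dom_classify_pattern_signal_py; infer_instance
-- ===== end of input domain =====

-- B replaces A's two filtered counting passes by a signed-weight table summed in one map-and-sum pass; simpler, same O(n).

-- ===== PORT A =====
-- A: two 0/1-sum passes over `patterns` with list membership, then compare the counts.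
def classify_pattern_signal_py (patterns : List String) : String :=
  let bullish_patterns : List String :=
    ["hammer", "inverted_hammer", "engulfing_bullish", "morning_star", "three_white_soldiers"]
  let bearish_patterns : List String :=
    ["shooting_star", "engulfing_bearish", "evening_star", "three_black_crows"]
  let bullish_count : Int :=
    patterns.foldl (fun acc p => if p ∈ bullish_patterns then acc + 1 else acc) 0
  let bearish_count : Int :=
    patterns.foldl (fun acc p => if p ∈ bearish_patterns then acc + 1 else acc) 0
  if bullish_count > bearish_count then "bullish"
  else if bearish_count > bullish_count then "bearish"
  else "neutral"

-- ===== PORT B =====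
-- B: module-level signed-weight dictionary; score = sum of looked-up weights.
def pvWeightsB : PySem.Dict String Int :=
  PySem.Dict.ofList
    [("hammer", 1), ("inverted_hammer", 1), ("engulfing_bullish", 1),
     ("morning_star", 1), ("three_white_soldiers", 1),
     ("shooting_star", -1), ("engulfing_bearish", -1),
     ("evening_star", -1), ("three_black_crows", -1)]

def classify_pattern_signal_py_alt (patterns : List String) : String :=
  let score : Int := (patterns.map (fun p => pvWeightsB.getD p 0)).sum
  if score > 0 then "bullish"
  else if score < 0 then "bearish"
  else "neutral"

-- ===== PRECONDITION & SPEC =====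
def Spec_classify_pattern_signal_py (patterns : List String) (out : String) : Prop := out = classify_pattern_signal_py_alt patterns
instance (patterns : List String) (out : String) : Decidable (Spec_classify_pattern_signal_py patterns out) := by unfold Spec_classify_pattern_signal_py; infer_instance

-- ===== CLAIM (what is proved, stated in full; the proofs are below) =====
def Claim_equal_classify_pattern_signal_py : Prop := ∀ (patterns : List String), Dom_classify_pattern_signal_py patterns → Spec_classify_pattern_signal_py patterns (classify_pattern_signal_py patterns)

-- ===== LEMMAS AND PROOFS =====

-- weight lookup = bullish indicator minus bearish indicator
lemma pv_weight_eq (p : String) :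
    pvWeightsB.getD p 0 =
      (if p ∈ (["hammer", "inverted_hammer", "engulfing_bullish", "morning_star", "three_white_soldiers"] : List String) then (1:Int) else 0)
      - (if p ∈ (["shooting_star", "engulfing_bearish", "evening_star", "three_black_crows"] : List String) then (1:Int) else 0) := by
  by_cases hb : p ∈ (["hammer", "inverted_hammer", "engulfing_bullish", "morning_star", "three_white_soldiers"] : List String)
  · simp only [List.mem_cons, List.not_mem_nil, or_false] at hb
    rcases hb with h | h | h | h | h <;> subst h <;> decide
  · by_cases hr : p ∈ (["shooting_star", "engulfing_bearish", "evening_star", "three_black_crows"] : List String)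
    · simp only [List.mem_cons, List.not_mem_nil, or_false] at hr
      rcases hr with h | h | h | h <;> subst h <;> decide
    · simp only [hb, hr, if_neg, not_false_iff, sub_zero]
      simp only [List.mem_cons, List.not_mem_nil, or_false, not_or] at hb hr
      simp [pvWeightsB, PySem.Dict.ofList, PySem.Dict.update, PySem.Dict.getD_insert,
            PySem.Dict.getD_empty, hb.1, hb.2.1, hb.2.2.1, hb.2.2.2.1, hb.2.2.2.2,
            hr.1, hr.2.1, hr.2.2.1, hr.2.2.2]

-- A's membership-count foldl equals the sum of 0/1 indicators
lemma pv_count_eq (L : List String) (ps : List String) (a : Int) :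
    ps.foldl (fun acc p => if p ∈ L then acc + 1 else acc) a
      = a + (ps.map (fun p => if p ∈ L then (1:Int) else 0)).sum := by
  induction ps generalizing a with
  | nil => simp
  | cons p ps ih =>
    simp only [List.foldl_cons, List.map_cons, List.sum_cons]
    by_cases h : p ∈ L
    · simp only [h, if_true]; rw [ih]; ring
    · simp only [h, if_false]; rw [ih]; ring

-- B's score is the difference of the two indicator sums
lemma pv_sum_eq (ps : List String) :
    (ps.map (fun p => pvWeightsB.getD p 0)).sum
      = (ps.map (fun p => if p ∈ (["hammer", "inverted_hammer", "engulfing_bullish", "morning_star", "three_white_soldiers"] : List String) then (1:Int) else 0)).sum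
        - (ps.map (fun p => if p ∈ (["shooting_star", "engulfing_bearish", "evening_star", "three_black_crows"] : List String) then (1:Int) else 0)).sum := by
  induction ps with
  | nil => simp
  | cons p ps ih =>
    simp only [List.map_cons, List.sum_cons]
    rw [ih, pv_weight_eq p]; ring

-- ===== VERDICT (by name: the statement is the Claim_ definition above) =====
theorem classify_pattern_signal_py_spec : Claim_equal_classify_pattern_signal_py := by
  intro patterns _
  unfold Spec_classify_pattern_signal_py classify_pattern_signal_py classify_pattern_signal_py_alt
  simp only
  rw [pv_count_eq, pv_count_eq, pv_sum_eq]
  split_ifs <;> first | rfl | omega
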